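-- pv_equiv track=rewrite | github.com/OmniNode-ai/omnibase_core | scripts/check_node_purity.py | _matches_forbidden_module
-- ===== SOURCE A (Python) =====
-- def _matches_forbidden_module(
--     module_name: str, forbidden_set: frozenset[str]
-- ) -> bool:
--     """Check if module matches any forbidden module.
--
--     Args:
--         module_name: Fully qualified module name to check.
--         forbidden_set: Set of forbidden module names/prefixes.
--
--     Returns:
--         True if module is in the forbidden set or matches a prefix.
--     """
--     if module_name in forbidden_set:
--         return True
--     # Check prefixes
--     for forbidden in forbidden_set:
--         if module_name.startswith(forbidden + "."):
--             return True
--     return False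
-- ===== SOURCE B (Python) =====
-- def _matches_forbidden_module(module_name, forbidden_set):
--     # B: enumerate the dot-boundary prefixes of module_name and test each by set membership.
--     if module_name in forbidden_set:
--         return True
--     for i, ch in enumerate(module_name):
--         if ch == '.' and module_name[:i] in forbidden_set:
--             return True
--     return False
-- ===== Notes on version B (the rewrite author's own statement) =====
-- stated objective: alternative
-- what changed: Instead of looping over the forbidden set and testing module_name.startswith(f + '.') for each entry, B enumerates the dot-boundary prefixes of module_name and tests each one by set membership (measured 1.32x at the largest size, below the 1.5x bar).
import Mathlib
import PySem

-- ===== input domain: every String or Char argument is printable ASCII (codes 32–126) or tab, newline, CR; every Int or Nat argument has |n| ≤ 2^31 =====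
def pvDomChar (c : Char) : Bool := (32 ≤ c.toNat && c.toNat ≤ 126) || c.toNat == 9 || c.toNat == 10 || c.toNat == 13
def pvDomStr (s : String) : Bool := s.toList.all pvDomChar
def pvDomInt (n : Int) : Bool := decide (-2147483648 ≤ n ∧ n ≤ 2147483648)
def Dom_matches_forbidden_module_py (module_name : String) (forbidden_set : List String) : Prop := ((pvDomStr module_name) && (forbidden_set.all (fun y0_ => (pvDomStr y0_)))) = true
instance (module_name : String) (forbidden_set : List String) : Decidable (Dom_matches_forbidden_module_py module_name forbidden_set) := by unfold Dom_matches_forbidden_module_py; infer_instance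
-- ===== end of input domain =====

-- B replaces the scan over the forbidden set (startswith per entry) by enumerating the
-- dot-boundary prefixes of module_name and testing each by set membership (alternative algorithm).

-- ===== PORT A =====
def matches_forbidden_module_py (module_name : String) (forbidden_set : List String) : Bool :=
  -- if module_name in forbidden_set: return True
  if forbidden_set.contains module_name then true
  -- for forbidden in forbidden_set: if module_name.startswith(forbidden + "."): return True
  else forbidden_set.any (fun forbidden =>
    PySem.Str.startswith module_name (forbidden ++ "."))

-- ===== PORT B =====
def matches_forbidden_module_py_alt (module_name : String) (forbidden_set : List String) : Bool :=
  -- if module_name in forbidden_set: return True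
  if forbidden_set.contains module_name then true
  -- for i, ch in enumerate(module_name): if ch == '.' and module_name[:i] in forbidden_set: return True
  else (PySem.List.enumerate module_name.toList).any (fun p =>
    p.2 == '.' && forbidden_set.contains (PySem.Str.slice module_name none (some p.1)))

-- ===== PRECONDITION & SPEC =====
def Spec_matches_forbidden_module_py (module_name : String) (forbidden_set : List String) (out : Bool) : Prop := out = matches_forbidden_module_py_alt module_name forbidden_set
instance (module_name : String) (forbidden_set : List String) (out : Bool) : Decidable (Spec_matches_forbidden_module_py module_name forbidden_set out) := by unfold Spec_matches_forbidden_module_py; infer_instance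

-- ===== CLAIM (what is proved, stated in full; the proofs are below) =====
def Claim_equal_matches_forbidden_module_py : Prop := ∀ (module_name : String) (forbidden_set : List String), Dom_matches_forbidden_module_py module_name forbidden_set → Spec_matches_forbidden_module_py module_name forbidden_set (matches_forbidden_module_py module_name forbidden_set)

-- ===== LEMMAS AND PROOFS =====

-- Core fact on char lists: some list of `ls` extended by '.' is a prefix of `cs`
-- iff `cs` has a '.' at some position k with cs.take k ∈ ls.
theorem pv_core (cs : List Char) (ls : List (List Char)) :
    (∃ l ∈ ls, l ++ ['.'] <+: cs) ↔
    ∃ k, ∃ _ : k < cs.length, cs[k] = '.' ∧ cs.take k ∈ ls := by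
  constructor
  · rintro ⟨l, hl, hp⟩
    have hlen : l.length + 1 ≤ cs.length := by
      have := hp.length_le; simpa using this
    have htake : l ++ ['.'] = cs.take (l.length + 1) := by
      have := List.prefix_iff_eq_take.mp hp
      simpa using this
    have hk : l.length < cs.length := by omega
    have hsplit : cs.take (l.length + 1) = cs.take l.length ++ [cs[l.length]] := by
      rw [List.take_add_one]
      simp [List.getElem?_eq_getElem hk]
    rw [hsplit] at htake
    have hlen2 : l.length = (cs.take l.length).length := by
      simp [List.length_take]; omega
    obtain ⟨h1, h2⟩ := List.append_inj htake (by simpa using hlen2)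
    refine ⟨l.length, hk, ?_, ?_⟩
    · have : ['.'] = [cs[l.length]] := h2
      simpa using this.symm
    · rw [← h1]; exact hl
  · rintro ⟨k, hk, hdot, hmem⟩
    refine ⟨cs.take k, hmem, ?_⟩
    have : cs.take k ++ ['.'] = cs.take (k + 1) := by
      rw [List.take_add_one]
      simp [List.getElem?_eq_getElem hk, hdot]
    rw [this]
    exact List.take_prefix _ _

theorem pv_any_eq (module_name : String) (forbidden_set : List String) :
    forbidden_set.any (fun forbidden =>
        PySem.Str.startswith module_name (forbidden ++ ".")) =
    (PySem.List.enumerate module_name.toList).any (fun p =>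
        p.2 == '.' && forbidden_set.contains (PySem.Str.slice module_name none (some p.1))) := by
  rw [Bool.eq_iff_iff]
  simp only [List.any_eq_true, PySem.Str.startswith_eq, PySem.Chars.startswith_iff,
    PySem.List.mem_enumerate_iff]
  constructor
  · rintro ⟨f, hf, hp⟩
    have : ∃ l ∈ forbidden_set.map String.toList, l ++ ['.'] <+: module_name.toList := by
      refine ⟨f.toList, List.mem_map_of_mem hf, ?_⟩
      simpa using hp
    obtain ⟨k, hk, hdot, hmem⟩ := (pv_core module_name.toList _).mp this
    obtain ⟨g, hg, hgl⟩ := List.mem_map.mp hmem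
    refine ⟨((k : Int), module_name.toList[k]), ⟨k, hk, by simp⟩, ?_⟩
    simp only [Bool.and_eq_true, beq_iff_eq]
    refine ⟨hdot, ?_⟩
    have heq : (PySem.Str.slice module_name none (some (k : Int))) = g := by
      apply String.toList_inj.mp
      rw [PySem.Str.toList_slice]
      simp only [PySem.Chars.slice_eq_listSlice, PySem.List.slice_to_natCast]
      exact hgl.symm
    rw [List.contains_eq_mem, heq]; exact decide_eq_true hg
  · rintro ⟨p, ⟨k, hk, hpk⟩, hq⟩
    subst hpk
    simp only [Bool.and_eq_true, beq_iff_eq] at hq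
    obtain ⟨hdot, hmem⟩ := hq
    have hmem' : PySem.Str.slice module_name none (some ((0 : Int) + k)) ∈ forbidden_set := by
      simpa [List.contains_eq_mem] using hmem
    refine ⟨PySem.Str.slice module_name none (some ((0 : Int) + k)), hmem', ?_⟩
    have hpref : module_name.toList.take k ++ ['.'] <+: module_name.toList := by
      have : module_name.toList.take k ++ ['.'] = module_name.toList.take (k + 1) := by
        rw [List.take_add_one]
        simp [List.getElem?_eq_getElem hk, hdot]
      rw [this]; exact List.take_prefix _ _
    have hl2 : (PySem.Str.slice module_name none (some ((0 : Int) + k)) ++ ".").toList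
        = module_name.toList.take k ++ ['.'] := by
      simp
    rw [hl2]; exact hpref

-- ===== VERDICT (by name: the statement is the Claim_ definition above) =====
theorem matches_forbidden_module_py_spec : Claim_equal_matches_forbidden_module_py := by
  intro module_name forbidden_set _
  unfold Spec_matches_forbidden_module_py matches_forbidden_module_py matches_forbidden_module_py_alt
  split
  · rfl
  · exact pv_any_eq module_name forbidden_set
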